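-- pv_equiv track=rewrite | github.com/maneloy/hello-world | Exercises/AlgoyProg1/ej6_3.py | reemplazar_espacios
-- ===== SOURCE A (Python) =====
-- def reemplazar_espacios(cadena, char, inserciones_maximas):
--     cadena_final = ""
--     maximo = 0
--     for letra in cadena:
--         if letra != ' ':
--             cadena_final += letra
--         elif maximo < inserciones_maximas:
--             maximo += 1
--             cadena_final += char
--         else:
--             cadena_final += letra
--     return cadena_final
-- ===== SOURCE B (Python) =====
-- def reemplazar_espacios(cadena, char, inserciones_maximas):
--     piezas = cadena.split(' ', max(inserciones_maximas, 0))
--     return char.join(piezas)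
-- ===== Notes on version B (the rewrite author's own statement) =====
-- stated objective: idiomatic
-- what changed: Replaced the explicit per-character loop carrying an accumulator and a counter by a split-then-join: cadena.split(' ', max(n,0)) cuts the string at the first n spaces and char.join glues the pieces back with the replacement; max(...,0) because split with a negative maxsplit splits everywhere while A replaces nothing.
import Mathlib
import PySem

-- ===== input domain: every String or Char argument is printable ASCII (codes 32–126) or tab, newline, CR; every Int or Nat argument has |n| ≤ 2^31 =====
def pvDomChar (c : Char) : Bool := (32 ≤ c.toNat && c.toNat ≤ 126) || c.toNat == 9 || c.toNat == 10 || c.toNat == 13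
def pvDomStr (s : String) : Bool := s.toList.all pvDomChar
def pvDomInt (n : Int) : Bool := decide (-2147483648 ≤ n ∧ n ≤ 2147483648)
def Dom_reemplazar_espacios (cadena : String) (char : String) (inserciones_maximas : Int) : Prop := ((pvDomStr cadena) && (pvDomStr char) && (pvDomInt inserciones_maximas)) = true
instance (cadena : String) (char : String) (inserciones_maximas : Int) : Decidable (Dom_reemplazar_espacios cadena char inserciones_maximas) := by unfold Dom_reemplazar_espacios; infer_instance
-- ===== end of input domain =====

-- B replaces A's per-character loop with a split-then-join (idiomatic; return value only).
-- ===== PORT A =====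
-- A's loop over the characters of cadena, carrying the counter `maximo`;
-- `cadena_final += char` appends the whole string char.
def pvLoopA (charL : List Char) (n : Int) : List Char → Int → List Char
  | [], _ => []
  | c :: cs, m =>
      if c ≠ ' ' then c :: pvLoopA charL n cs m
      else if m < n then charL ++ pvLoopA charL n cs (m + 1)
      else c :: pvLoopA charL n cs m

def reemplazar_espacios (cadena : String) (char : String) (inserciones_maximas : Int) : String :=
  String.mk (pvLoopA char.toList inserciones_maximas cadena.toList 0)

-- ===== PORT B =====
-- hand port of cadena.split(' ', k): exact here since the separator is the single
-- nonempty character ' ' and k = max(n,0) ≥ 0 — cut at the first k spaces.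
def pvSplitK : List Char → Nat → List (List Char)
  | [], _ => [[]]
  | c :: cs, k =>
      if c = ' ' ∧ k ≠ 0 then [] :: pvSplitK cs (k - 1)
      else
        match pvSplitK cs k with
        | [] => [[c]]        -- unreachable: pvSplitK never returns []
        | h :: t => (c :: h) :: t

-- hand port of char.join(pieces) (Python str.join).
def pvJoin (sep : List Char) : List (List Char) → List Char
  | [] => []
  | [x] => x
  | x :: xs => x ++ sep ++ pvJoin sep xs

def reemplazar_espacios_alt (cadena : String) (char : String) (inserciones_maximas : Int) : String :=
  String.mk (pvJoin char.toList (pvSplitK cadena.toList (max inserciones_maximas 0).toNat))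

-- ===== PRECONDITION & SPEC =====
def Spec_reemplazar_espacios (cadena : String) (char : String) (inserciones_maximas : Int) (out : String) : Prop := out = reemplazar_espacios_alt cadena char inserciones_maximas
instance (cadena : String) (char : String) (inserciones_maximas : Int) (out : String) : Decidable (Spec_reemplazar_espacios cadena char inserciones_maximas out) := by unfold Spec_reemplazar_espacios; infer_instance

-- ===== CLAIM (what is proved, stated in full; the proofs are below) =====
def Claim_equal_reemplazar_espacios : Prop := ∀ (cadena : String) (char : String) (inserciones_maximas : Int), Dom_reemplazar_espacios cadena char inserciones_maximas → Spec_reemplazar_espacios cadena char inserciones_maximas (reemplazar_espacios cadena char inserciones_maximas)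

-- ===== LEMMAS AND PROOFS =====
theorem pvSplitK_ne_nil : ∀ (cs : List Char) (k : Nat), pvSplitK cs k ≠ [] := by
  intro cs
  induction cs with
  | nil => intro k; simp [pvSplitK]
  | cons c cs ih =>
      intro k
      simp only [pvSplitK]
      split
      · simp
      · split
        · simp
        · simp

theorem pvJoin_cons_head (sep : List Char) (c : Char) (h : List Char) (t : List (List Char)) :
    pvJoin sep ((c :: h) :: t) = c :: pvJoin sep (h :: t) := by
  cases t with
  | nil => simp [pvJoin]
  | cons y ys => simp [pvJoin]

theorem pvLoopA_eq_join_split (charL : List Char) (n : Int) :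
    ∀ (cs : List Char) (m : Int),
      pvLoopA charL n cs m = pvJoin charL (pvSplitK cs (n - m).toNat) := by
  intro cs
  induction cs with
  | nil => intro m; simp [pvLoopA, pvSplitK, pvJoin]
  | cons c cs ih =>
      intro m
      by_cases hc : c = ' '
      · by_cases hm : m < n
        · have hk : (n - m).toNat ≠ 0 := by omega
          have hk' : (n - m).toNat - 1 = (n - (m + 1)).toNat := by omega
          have hne := pvSplitK_ne_nil cs ((n - m).toNat - 1)
          simp only [pvLoopA, pvSplitK, hc, hm, hk, if_neg, not_true, ne_eq,
            not_false_eq_true, and_self, if_pos]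
          rw [hk']
          cases hsp : pvSplitK cs (n - (m + 1)).toNat with
          | nil => exact absurd hsp (hk' ▸ hne)
          | cons y ys =>
              simp [pvJoin, ih, hsp]
        · have hk : (n - m).toNat = 0 := by omega
          have := ih m
          simp only [pvLoopA, pvSplitK, hc, hm, hk, ne_eq, not_true_eq_false, if_false, and_false]
          cases hsp : pvSplitK cs 0 with
          | nil => exact absurd hsp (pvSplitK_ne_nil _ _)
          | cons y ys =>
              show ' ' :: pvLoopA charL n cs m = pvJoin charL ((' ' :: y) :: ys)
              rw [pvJoin_cons_head, ← hsp]
              rw [this, hk]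
      · have := ih m
        simp only [pvLoopA, pvSplitK, hc, ne_eq, not_false_eq_true, if_true, false_and, if_false]
        cases hsp : pvSplitK cs (n - m).toNat with
        | nil => exact absurd hsp (pvSplitK_ne_nil _ _)
        | cons y ys =>
            show c :: pvLoopA charL n cs m = pvJoin charL ((c :: y) :: ys)
            rw [pvJoin_cons_head, ← hsp, this]

-- ===== VERDICT (by name: the statement is the Claim_ definition above) =====
theorem reemplazar_espacios_spec : Claim_equal_reemplazar_espacios := by
  intro cadena char n _
  unfold Spec_reemplazar_espacios reemplazar_espacios reemplazar_espacios_alt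
  rw [pvLoopA_eq_join_split]
  have h : (n - 0).toNat = (max n 0).toNat := by omega
  rw [h]
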